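-- pv_equiv track=rewrite | github.com/masonnystrom/Graphs | projects/ancestor/ancestor.py | class_earliest_ancestor
-- ===== SOURCE A (Python) =====
-- from collections import deque
-- from collections import defaultdict
--
-- def class_earliest_ancestor(ancestors, starting_node):
--     graph = createGraph(ancestors)
--     stack = deque()
--     stack.append((starting_node, 0)) # node and distance from starting_node
--     visited = set()
--     # using tuple and compare and traverse to see if earlier than the earliest ancestor we have found
--     earliestAncestor = (starting_node, 0)
--
--     while len(stack) > 0:
--         curr = stack.pop() # (current node, distance from starting node)
--         currNode, distance = curr[0], curr[1]
--         visited.add(curr)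
--
--             # if key not in graph they are a terminal node
--         if currNode not in graph:
--             # check to see if node is earlier than current ancestor
--             if distance > earliestAncestor[1]:
--                 earliestAncestor = curr
--             # if node is earlier and lower than dual parent id
--             elif distance == earliestAncestor[1] and currNode < earliestAncestor[0]:
--                 earliestAncestor = curr
--
--         # if ancestor has more ancestors, keep traversing
--         else:
--             for ancestor in graph[currNode]:
--                 if ancestor not in visited:
--                     stack.append((ancestor, distance +1))
--
--     return earliestAncestor[0] if earliestAncestor[0] != starting_node else -1
--
-- def createGraph(edges):
--     # every key added to this dictionary will have a default value of set()
--     graph = defaultdict(set)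
--     for edge in edges:
--         ancestor, child = edge[0], edge[1]
--         graph[child].add(ancestor)
--     return graph
-- ===== SOURCE B (Python) =====
-- def class_earliest_ancestor(ancestors, starting_node):
--     # memoized longest-path DP over the parent DAG (each node's answer computed once)
--     parents = {}
--     for a, c in ancestors:
--         parents.setdefault(c, set()).add(a)
--     memo = {}
--
--     def deepest(n):
--         # returns (distance to its deepest terminal ancestor, -that ancestor's id);
--         # max() then prefers greater depth, breaking ties toward the smallest id
--         if n in memo:
--             return memo[n]
--         if n not in parents:
--             r = (0, -n)
--         else:
--             vals = []
--             for p in parents[n]: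
--                 d, t = deepest(p)
--                 vals.append((d + 1, t))
--             r = max(vals)
--         memo[n] = r
--         return r
--
--     d, negt = deepest(starting_node)
--     return -negt if -negt != starting_node else -1
-- ===== Notes on version B (the rewrite author's own statement) =====
-- stated objective: alternative
-- what changed: A explores every path of the ancestor DAG with an explicit stack (its visited check compares ints against tuples and never prunes); B instead computes each node's deepest terminal ancestor exactly once by memoized recursion (longest-path DP keyed by node).
import Mathlib
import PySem

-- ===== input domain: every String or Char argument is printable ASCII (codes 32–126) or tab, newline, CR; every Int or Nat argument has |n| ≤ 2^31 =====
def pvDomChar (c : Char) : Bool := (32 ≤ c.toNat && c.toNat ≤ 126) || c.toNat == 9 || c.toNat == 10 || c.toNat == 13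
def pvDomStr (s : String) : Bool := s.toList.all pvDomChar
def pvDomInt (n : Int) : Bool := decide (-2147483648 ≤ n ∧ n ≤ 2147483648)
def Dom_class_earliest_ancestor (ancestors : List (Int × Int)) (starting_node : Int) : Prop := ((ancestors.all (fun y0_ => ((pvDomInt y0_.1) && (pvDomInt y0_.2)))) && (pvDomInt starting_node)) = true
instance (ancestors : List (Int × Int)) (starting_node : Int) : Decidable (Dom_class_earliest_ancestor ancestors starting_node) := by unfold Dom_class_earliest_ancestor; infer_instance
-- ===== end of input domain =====

-- B replaces A's explore-every-path stack search (whose visited check never prunes) by a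
-- memoized longest-path DP over the parent DAG, computing each node's answer once (objective: alternative).

-- ===== PORT A =====
-- createGraph: defaultdict(set); graph[child].add(ancestor)
def pvGraphA (ancestors : List (Int × Int)) : PySem.Dict Int (PySem.Set Int) :=
  ancestors.foldl (fun g e => g.modify e.2 PySem.Set.empty (fun s => s.add e.1)) PySem.Dict.empty

-- fuel bound for the while loop: a fueled count of the number of stack pops the Python loop
-- performs from node n (1 + sum over parents); proved sufficient under Pre_ (acyclic reachable part)
def pvPcF (ancestors : List (Int × Int)) : Nat → Int → Nat
  | 0, _ => 1
  | k+1, n =>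
    match (pvGraphA ancestors).getD n PySem.Set.empty with
    | [] => 1
    | ps => 1 + (ps.map (pvPcF ancestors k)).sum

-- the while loop; stack head = right end of the Python deque (append/pop both act there);
-- pairs are (node, distance) as in the Python
def pvLoopA (g : PySem.Dict Int (PySem.Set Int)) :
    Nat → List (Int × Int) → PySem.Set (Int × Int) → (Int × Int) → (Int × Int)
  | 0, _, _, best => best
  | fuel+1, stack, visited, best =>
    match stack with
    | [] => best
    | curr :: rest =>
      let currNode := curr.1
      let distance := curr.2
      let visited' := visited.add curr
      if g.contains currNode = false then
        let best' :=
          if distance > best.2 then curr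
          else if distance = best.2 ∧ currNode < best.1 then curr
          else best
        pvLoopA g fuel rest visited' best'
      else
        -- Python: 'if ancestor not in visited' tests an int against a set of TUPLES: always True
        pvLoopA g fuel
          ((g.getD currNode PySem.Set.empty).foldl (fun st p => (p, distance + 1) :: st) rest)
          visited' best

def class_earliest_ancestor (ancestors : List (Int × Int)) (starting_node : Int) : Int :=
  let g := pvGraphA ancestors
  let best := pvLoopA g (pvPcF ancestors (ancestors.length + 1) starting_node)
      [(starting_node, 0)] PySem.Set.empty (starting_node, 0)
  if best.1 ≠ starting_node then best.1 else -1

-- ===== PORT B =====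
-- parents.setdefault(c, set()).add(a)  (same dict-of-sets as A's createGraph)
def pvGraphB (ancestors : List (Int × Int)) : PySem.Dict Int (PySem.Set Int) :=
  ancestors.foldl (fun g e => g.modify e.2 PySem.Set.empty (fun s => s.add e.1)) PySem.Dict.empty

-- deepest(n): memoized; returns (depth of deepest terminal ancestor, -its id), threading the memo dict
def pvBestB (g : PySem.Dict Int (PySem.Set Int)) :
    Nat → PySem.Dict Int (Int × Int) → Int → (Int × Int) × PySem.Dict Int (Int × Int)
  | 0, memo, n => ((0, -n), memo)   -- fuel guard only; never reached under Pre_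
  | fuel+1, memo, n =>
    match memo.get? n with
    | some r => (r, memo)
    | none =>
      match g.get? n with
      | none =>
        let r : Int × Int := (0, -n)
        (r, memo.insert n r)
      | some ps =>
        let st := ps.foldl (fun acc p =>
            let res := pvBestB g fuel acc.2 p
            (acc.1 ++ [(res.1.1 + 1, res.1.2)], res.2)) (([] : List (Int × Int)), memo)
        let r :=
          match st.1 with
          | [] => ((0 : Int), -n)   -- unreachable: ps is a nonempty set
          | v :: vs => vs.foldl (fun a b => if a.1 < b.1 ∨ (a.1 = b.1 ∧ a.2 < b.2) then b else a) v
        (r, st.2.insert n r)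

def class_earliest_ancestor_alt (ancestors : List (Int × Int)) (starting_node : Int) : Int :=
  let g := pvGraphB ancestors
  let r := (pvBestB g (ancestors.length + 2) PySem.Dict.empty starting_node).1
  if -r.2 ≠ starting_node then -r.2 else -1

-- ===== PRECONDITION & SPEC =====
-- parents of n as a Finset, straight from the edge list (reader-checkable)
def pvParF (ancestors : List (Int × Int)) (n : Int) : Finset Int :=
  ((ancestors.filter (fun e => e.2 = n)).map (fun e => e.1)).toFinset
-- one step of upward reachability
def pvStepF (ancestors : List (Int × Int)) (S : Finset Int) : Finset Int :=
  S ∪ S.biUnion (pvParF ancestors)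
def pvIterF (ancestors : List (Int × Int)) (k : Nat) (S : Finset Int) : Finset Int :=
  (pvStepF ancestors)^[k] S
-- nodes reachable from s (iterated to its fixpoint: fuel exceeds the number of nodes)
def pvReach (ancestors : List (Int × Int)) (s : Int) : Finset Int :=
  pvIterF ancestors (2 * ancestors.length + 2) {s}
-- nodes strictly above n (reachable in ≥ 1 parent step)
def pvStrict (ancestors : List (Int × Int)) (n : Int) : Finset Int :=
  pvIterF ancestors (2 * ancestors.length + 2) (pvParF ancestors n)

-- Pre_ excludes exactly the inputs on which a cycle of the ancestor graph is reachable from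
-- starting_node: there Python A loops forever (its visited check compares ints to tuples and
-- never prunes), so A returns on no excluded input.
def Pre_class_earliest_ancestor (ancestors : List (Int × Int)) (starting_node : Int) : Prop :=
  ∀ n ∈ pvReach ancestors starting_node, n ∉ pvStrict ancestors n
instance (ancestors : List (Int × Int)) (starting_node : Int) : Decidable (Pre_class_earliest_ancestor ancestors starting_node) := by unfold Pre_class_earliest_ancestor; infer_instance

def pvWitness_class_earliest_ancestor : (List (Int × Int)) × Int := ([(10, 3), (2, 3), (2, 10)], 3)

def Spec_class_earliest_ancestor (ancestors : List (Int × Int)) (starting_node : Int) (out : Int) : Prop := out = class_earliest_ancestor_alt ancestors starting_node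
instance (ancestors : List (Int × Int)) (starting_node : Int) (out : Int) : Decidable (Spec_class_earliest_ancestor ancestors starting_node out) := by unfold Spec_class_earliest_ancestor; infer_instance

-- ===== CLAIM (what is proved, stated in full; the proofs are below) =====
def Claim_equal_class_earliest_ancestor : Prop := ∀ (ancestors : List (Int × Int)) (starting_node : Int), Dom_class_earliest_ancestor ancestors starting_node → Pre_class_earliest_ancestor ancestors starting_node → Spec_class_earliest_ancestor ancestors starting_node (class_earliest_ancestor ancestors starting_node)

-- ===== LEMMAS AND PROOFS =====

-- ---------- spec-side definitions ----------

def pvPar (ancestors : List (Int × Int)) (n : Int) : PySem.Set Int :=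
  (pvGraphA ancestors).getD n PySem.Set.empty

def pvMax2 (x y : Int × Int) : Int × Int :=
  if y.2 > x.2 ∨ (y.2 = x.2 ∧ y.1 < x.1) then y else x

def pvShift (k : Int) (x : Int × Int) : Int × Int := (x.1, x.2 + k)

def pvValF (ancestors : List (Int × Int)) : Nat → Int → Int × Int
  | 0, n => (n, 0)
  | k+1, n =>
    match pvPar ancestors n with
    | [] => (n, 0)
    | q :: qs => qs.foldl (fun a p => pvMax2 a (pvShift 1 (pvValF ancestors k p)))
        (pvShift 1 (pvValF ancestors k q))

def pvVAL (ancestors : List (Int × Int)) (n : Int) : Int × Int :=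
  pvValF ancestors (ancestors.length + 1) n

def pvPC (ancestors : List (Int × Int)) (n : Int) : Nat :=
  pvPcF ancestors (ancestors.length + 1) n

def pvHgt (ancestors : List (Int × Int)) (n : Int) : Nat := (pvStrict ancestors n).card

-- ---------- the graph dictionary ----------

theorem pv_getD_graph_fold (E : List (Int × Int)) (g : PySem.Dict Int (PySem.Set Int)) (n : Int) :
    ((E.foldl (fun g e => g.modify e.2 PySem.Set.empty (fun s => s.add e.1)) g).getD n PySem.Set.empty)
      = ((E.filter (fun e => e.2 = n)).map (fun e => e.1)).foldl PySem.Set.add (g.getD n PySem.Set.empty) := by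
  induction E generalizing g with
  | nil => simp
  | cons e E ih =>
    simp only [List.foldl_cons, List.filter_cons]
    rw [ih]
    by_cases h : e.2 = n
    · simp [h]
    · simp [h, PySem.Dict.getD_modify, Ne.symm h]

theorem pv_pvPar_eq (E : List (Int × Int)) (n : Int) :
    pvPar E n = PySem.Set.ofList ((E.filter (fun e => e.2 = n)).map (fun e => e.1)) := by
  rw [pvPar, pvGraphA, pv_getD_graph_fold, PySem.Set.ofList_eq_foldl]
  simp [PySem.Set.empty]

theorem pv_mem_pvPar (E : List (Int × Int)) (n p : Int) :
    p ∈ pvPar E n ↔ p ∈ (E.filter (fun e => e.2 = n)).map (fun e => e.1) := by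
  rw [pv_pvPar_eq]; exact PySem.Set.mem_ofList _ _

theorem pv_pvPar_nil_iff (E : List (Int × Int)) (n : Int) :
    pvPar E n = [] ↔ (E.filter (fun e => e.2 = n)).map (fun e => e.1) = [] := by
  constructor <;> intro h
  · rcases hl : (E.filter (fun e => e.2 = n)).map (fun e => e.1) with _ | ⟨x, xs⟩
    · exact hl
    · exfalso
      have : x ∈ pvPar E n := (pv_mem_pvPar E n x).2 (by rw [hl]; exact List.mem_cons_self ..)
      rw [h] at this; simp at this
  · rw [pv_pvPar_eq, h]; rfl

theorem pv_contains_graph (E : List (Int × Int)) (n : Int) :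
    (pvGraphA E).contains n = false ↔ pvPar E n = [] := by
  have hkeys : (pvGraphA E).keys = PySem.Set.ofList (E.map (fun e => e.2)) := by
    rw [pvGraphA, PySem.Dict.keys_foldl_modify_key]
    simp [PySem.Set.update_nil_left]
  rw [PySem.Dict.contains_eq_decide_mem_keys, hkeys, pv_pvPar_nil_iff]
  simp only [decide_eq_false_iff_not, PySem.Set.mem_ofList, List.mem_map]
  constructor
  · intro h
    rcases hl : (E.filter (fun e => e.2 = n)).map (fun e => e.1) with _ | ⟨x, xs⟩
    · exact hl
    · exfalso
      have hx : x ∈ (E.filter (fun e => e.2 = n)).map (fun e => e.1) := by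
        rw [hl]; exact List.mem_cons_self ..
      rcases List.mem_map.1 hx with ⟨e, he, _⟩
      exact h ⟨e, (List.mem_filter.1 he).1, of_decide_eq_true (List.mem_filter.1 he).2⟩
  · intro h
    rintro ⟨e, he, he2⟩
    have : e.1 ∈ (E.filter (fun e => e.2 = n)).map (fun e => e.1) :=
      List.mem_map.2 ⟨e, List.mem_filter.2 ⟨he, by simp [he2]⟩, rfl⟩
    rw [h] at this; simp at this

theorem pv_get?_graph_some (E : List (Int × Int)) (n : Int) (v : PySem.Set Int)
    (h : (pvGraphA E).get? n = some v) : v = pvPar E n := by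
  have := PySem.Dict.getD_of_get?_eq_some (d := pvGraphA E) (k := n) (v := v) (d0 := PySem.Set.empty) h
  rw [pvPar, this]

theorem pv_get?_graph_none (E : List (Int × Int)) (n : Int)
    (h : (pvGraphA E).get? n = none) : pvPar E n = [] := by
  rw [← pv_contains_graph, PySem.Dict.contains_eq_isSome_get?, h]; rfl


theorem pv_witness_ok :
    Dom_class_earliest_ancestor pvWitness_class_earliest_ancestor.1 pvWitness_class_earliest_ancestor.2 ∧
    Pre_class_earliest_ancestor pvWitness_class_earliest_ancestor.1 pvWitness_class_earliest_ancestor.2 := by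
  constructor <;> decide

-- ---------- reachability: fixpoint machinery ----------

theorem pv_step_grow (E : List (Int × Int)) (S : Finset Int) : S ⊆ pvStepF E S :=
  Finset.subset_union_left

theorem pv_step_mono (E : List (Int × Int)) {S T : Finset Int} (h : S ⊆ T) :
    pvStepF E S ⊆ pvStepF E T := by
  intro x hx
  simp only [pvStepF, Finset.mem_union, Finset.mem_biUnion] at hx ⊢
  rcases hx with hx | ⟨m, hm, hx⟩
  · exact Or.inl (h hx)
  · exact Or.inr ⟨m, h hm, hx⟩

theorem pv_parF_subset (E : List (Int × Int)) (n : Int) :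
    pvParF E n ⊆ (E.map (fun e => e.1)).toFinset := by
  intro x hx
  simp only [pvParF, List.mem_toFinset, List.mem_map, List.mem_filter] at hx ⊢
  rcases hx with ⟨e, ⟨he, _⟩, hx⟩
  exact ⟨e, he, hx⟩

theorem pv_step_subset (E : List (Int × Int)) {S U : Finset Int} (hS : S ⊆ U)
    (hP : (E.map (fun e => e.1)).toFinset ⊆ U) : pvStepF E S ⊆ U := by
  intro x hx
  simp only [pvStepF, Finset.mem_union, Finset.mem_biUnion] at hx
  rcases hx with hx | ⟨m, _, hx⟩
  · exact hS hx
  · exact hP (pv_parF_subset E m hx)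

theorem pv_subset_iterF (E : List (Int × Int)) (S : Finset Int) (k : Nat) :
    S ⊆ pvIterF E k S := by
  induction k with
  | zero => simp [pvIterF]
  | succ k ih =>
    have : pvIterF E (k+1) S = pvStepF E (pvIterF E k S) := by
      simp [pvIterF, Function.iterate_succ_apply']
    rw [this]
    exact ih.trans (pv_step_grow E _)

theorem pv_iterF_succ (E : List (Int × Int)) (S : Finset Int) (k : Nat) :
    pvIterF E (k+1) S = pvStepF E (pvIterF E k S) := by
  simp [pvIterF, Function.iterate_succ_apply']

theorem pv_iterF_subset_U (E : List (Int × Int)) {S U : Finset Int} (hS : S ⊆ U)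
    (hP : (E.map (fun e => e.1)).toFinset ⊆ U) (k : Nat) : pvIterF E k S ⊆ U := by
  induction k with
  | zero => simpa [pvIterF] using hS
  | succ k ih => rw [pv_iterF_succ]; exact pv_step_subset E ih hP

theorem pv_iterF_fix (E : List (Int × Int)) {S U : Finset Int} (hS : S ⊆ U)
    (hP : (E.map (fun e => e.1)).toFinset ⊆ U) {N : Nat} (hN : U.card < N) :
    pvStepF E (pvIterF E N S) = pvIterF E N S := by
  have hsub : ∀ k, pvIterF E k S ⊆ U := pv_iterF_subset_U E hS hP
  have key : ∃ k, k ≤ U.card ∧ pvIterF E (k+1) S = pvIterF E k S := by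
    by_contra hcon
    push_neg at hcon
    have grow : ∀ k, k ≤ U.card + 1 → k ≤ (pvIterF E k S).card := by
      intro k
      induction k with
      | zero => intro _; exact Nat.zero_le _
      | succ k ih =>
        intro hk
        have h1 : k ≤ (pvIterF E k S).card := ih (by omega)
        have hne : pvIterF E (k+1) S ≠ pvIterF E k S := hcon k (by omega)
        have hss : pvIterF E k S ⊂ pvIterF E (k+1) S := by
          constructor
          · rw [pv_iterF_succ]; exact pv_step_grow E _
          · intro hsub2
            exact hne (Finset.Subset.antisymm hsub2 (by rw [pv_iterF_succ]; exact pv_step_grow E _))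
        have := Finset.card_lt_card hss
        omega
    have h1 := grow (U.card + 1) (le_refl _)
    have h2 := Finset.card_le_card (hsub (U.card + 1))
    omega
  obtain ⟨k, hk, hfix⟩ := key
  have stick : ∀ m, pvIterF E (k + m) S = pvIterF E k S := by
    intro m
    induction m with
    | zero => rfl
    | succ m ih =>
      have : k + (m+1) = (k + m) + 1 := by omega
      rw [this, pv_iterF_succ, ih, ← pv_iterF_succ, hfix]
  have hNk : N = k + (N - k) := by omega
  rw [hNk, stick, ← pv_iterF_succ]
  exact hfix

theorem pv_reach_fix (E : List (Int × Int)) (s : Int) :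
    pvStepF E (pvReach E s) = pvReach E s := by
  apply pv_iterF_fix E (U := {s} ∪ (E.map (fun e => e.1)).toFinset)
  · exact Finset.subset_union_left
  · exact Finset.subset_union_right
  · have h1 : ({s} ∪ (E.map (fun e => e.1)).toFinset).card ≤ 1 + E.length := by
      have := Finset.card_union_le ({s} : Finset Int) (E.map (fun e => e.1)).toFinset
      have h2 : ((E.map (fun e => e.1)).toFinset).card ≤ E.length := by
        have := (E.map (fun e => e.1)).toFinset_card_le
        simpa using this
      simp only [Finset.card_singleton] at this
      omega
    omega

theorem pv_strict_fix (E : List (Int × Int)) (n : Int) :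
    pvStepF E (pvStrict E n) = pvStrict E n := by
  apply pv_iterF_fix E (U := (E.map (fun e => e.1)).toFinset)
  · exact pv_parF_subset E n
  · exact Finset.Subset.refl _
  · have h2 : ((E.map (fun e => e.1)).toFinset).card ≤ E.length := by
      have := (E.map (fun e => e.1)).toFinset_card_le
      simpa using this
    omega

-- ---------- closure properties ----------

theorem pv_mem_parF (E : List (Int × Int)) (n p : Int) (h : p ∈ pvPar E n) : p ∈ pvParF E n := by
  rw [pvParF, List.mem_toFinset]
  exact (pv_mem_pvPar E n p).1 h

theorem pv_par_mem_step (E : List (Int × Int)) {S : Finset Int} {n p : Int}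
    (hn : n ∈ S) (hp : p ∈ pvPar E n) : p ∈ pvStepF E S := by
  simp only [pvStepF, Finset.mem_union, Finset.mem_biUnion]
  exact Or.inr ⟨n, hn, pv_mem_parF E n p hp⟩

theorem pv_mem_reach_self (E : List (Int × Int)) (s : Int) : s ∈ pvReach E s :=
  pv_subset_iterF E {s} _ (Finset.mem_singleton_self s)

theorem pv_reach_closed (E : List (Int × Int)) {s n p : Int}
    (hn : n ∈ pvReach E s) (hp : p ∈ pvPar E n) : p ∈ pvReach E s := by
  rw [← pv_reach_fix]
  exact pv_par_mem_step E hn hp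

theorem pv_strict_base (E : List (Int × Int)) {n p : Int} (hp : p ∈ pvPar E n) :
    p ∈ pvStrict E n :=
  pv_subset_iterF E _ _ (pv_mem_parF E n p hp)

theorem pv_strict_closed (E : List (Int × Int)) {n p q : Int}
    (hp : p ∈ pvStrict E n) (hq : q ∈ pvPar E p) : q ∈ pvStrict E n := by
  rw [← pv_strict_fix]
  exact pv_par_mem_step E hp hq

theorem pv_iterF_subset_closed (E : List (Int × Int)) {S T : Finset Int}
    (hfix : pvStepF E T = T) (h0 : S ⊆ T) (k : Nat) : pvIterF E k S ⊆ T := by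
  induction k with
  | zero => simpa [pvIterF] using h0
  | succ k ih =>
    rw [pv_iterF_succ]
    calc pvStepF E (pvIterF E k S) ⊆ pvStepF E T := pv_step_mono E ih
    _ = T := hfix

theorem pv_strict_subset (E : List (Int × Int)) {n p : Int} (hp : p ∈ pvPar E n) :
    pvStrict E p ⊆ pvStrict E n := by
  apply pv_iterF_subset_closed E (pv_strict_fix E n)
  intro q hq
  rw [pvParF, List.mem_toFinset] at hq
  exact pv_strict_closed E (pv_strict_base E hp) ((pv_mem_pvPar E p q).2 hq)

theorem pv_hgt_lt (E : List (Int × Int)) {s n p : Int}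
    (hpre : Pre_class_earliest_ancestor E s) (hn : n ∈ pvReach E s) (hp : p ∈ pvPar E n) :
    pvHgt E p < pvHgt E n := by
  apply Finset.card_lt_card
  constructor
  · exact pv_strict_subset E hp
  · intro hsub
    exact hpre p (pv_reach_closed E hn hp) (hsub (pv_strict_base E hp))

theorem pv_hgt_le (E : List (Int × Int)) (n : Int) : pvHgt E n ≤ E.length := by
  have hfix : pvStepF E ((E.map (fun e => e.1)).toFinset) = (E.map (fun e => e.1)).toFinset := by
    apply Finset.Subset.antisymm
    · exact pv_step_subset E (Finset.Subset.refl _) (Finset.Subset.refl _)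
    · exact pv_step_grow E _
  have hsub : pvStrict E n ⊆ (E.map (fun e => e.1)).toFinset :=
    pv_iterF_subset_closed E hfix (pv_parF_subset E n) _
  have h1 := Finset.card_le_card hsub
  have h2 : ((E.map (fun e => e.1)).toFinset).card ≤ E.length := by
    have := (E.map (fun e => e.1)).toFinset_card_le
    simpa using this
  calc pvHgt E n ≤ _ := h1
  _ ≤ E.length := h2

-- ---------- pvMax2 algebra ----------

theorem pv_max2_comm (x y : Int × Int) : pvMax2 x y = pvMax2 y x := by
  rcases x with ⟨a, b⟩; rcases y with ⟨c, d⟩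
  simp only [pvMax2]
  split_ifs with h1 h2 h2 <;> first
    | rfl
    | (exact Prod.ext (by omega) (by omega))

theorem pv_max2_assoc (x y z : Int × Int) : pvMax2 (pvMax2 x y) z = pvMax2 x (pvMax2 y z) := by
  rcases x with ⟨a, b⟩; rcases y with ⟨c, d⟩; rcases z with ⟨e, f⟩
  simp only [pvMax2]
  split_ifs <;> first
    | rfl
    | (exact Prod.ext (by omega) (by omega))
    | omega

theorem pv_max2_self (x : Int × Int) : pvMax2 x x = x := by
  simp [pvMax2]

theorem pv_max2_right {x y : Int × Int} (h : x.2 < y.2) : pvMax2 x y = y := by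
  simp only [pvMax2]
  rw [if_pos (Or.inl h)]

-- pulling the seed out of a max-fold
theorem pv_foldl_max2_pull {α : Type} (f : α → Int × Int) (l : List α) :
    ∀ b c, l.foldl (fun a x => pvMax2 a (f x)) (pvMax2 b c)
      = pvMax2 b (l.foldl (fun a x => pvMax2 a (f x)) c) := by
  induction l with
  | nil => intro b c; rfl
  | cons x l ih =>
    intro b c
    simp only [List.foldl_cons]
    rw [pv_max2_assoc, ih]

theorem pv_foldl_max2_cons {α : Type} (f : α → Int × Int) (b : Int × Int) (q : α) (l : List α) :
    (q :: l).foldl (fun a x => pvMax2 a (f x)) b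
      = pvMax2 b (l.foldl (fun a x => pvMax2 a (f x)) (f q)) := by
  simp only [List.foldl_cons]
  rw [pv_foldl_max2_pull]

theorem pv_foldl_max2_perm {α : Type} (f : α → Int × Int) (b : Int × Int) {l l' : List α}
    (h : l.Perm l') :
    l.foldl (fun a x => pvMax2 a (f x)) b = l'.foldl (fun a x => pvMax2 a (f x)) b := by
  haveI : RightCommutative (fun a x => pvMax2 a (f x)) :=
    ⟨fun a x y => by
      show pvMax2 (pvMax2 a (f x)) (f y) = pvMax2 (pvMax2 a (f y)) (f x)
      rw [pv_max2_assoc, pv_max2_assoc, pv_max2_comm (f x) (f y)]⟩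
  exact h.foldl_eq b

-- membership of a max-fold's result
theorem pv_foldl_max2_mem {α : Type} (f : α → Int × Int) (l : List α) :
    ∀ b, l.foldl (fun a x => pvMax2 a (f x)) b = b ∨
      ∃ x ∈ l, l.foldl (fun a x => pvMax2 a (f x)) b = f x := by
  induction l with
  | nil => intro b; exact Or.inl rfl
  | cons x l ih =>
    intro b
    simp only [List.foldl_cons]
    rcases ih (pvMax2 b (f x)) with h | ⟨y, hy, h⟩
    · rw [h]
      by_cases hc : pvMax2 b (f x) = b
      · rw [hc]; exact Or.inl rfl
      · right
        refine ⟨x, List.mem_cons_self .., ?_⟩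
        simp only [pvMax2] at hc ⊢
        split_ifs with hif
        · rfl
        · exact absurd rfl (by rw [if_neg hif] at hc; exact hc)
    · exact Or.inr ⟨y, List.mem_cons_of_mem x hy, h⟩

theorem pv_shift_max2 (k : Int) (x y : Int × Int) :
    pvShift k (pvMax2 x y) = pvMax2 (pvShift k x) (pvShift k y) := by
  rcases x with ⟨a, b⟩; rcases y with ⟨c, d⟩
  simp only [pvMax2, pvShift]
  split_ifs <;> first | rfl | omega

theorem pv_shift_shift (j k : Int) (x : Int × Int) :
    pvShift k (pvShift j x) = pvShift (j + k) x := by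
  simp [pvShift, add_assoc]

theorem pv_shift_zero (x : Int × Int) : pvShift 0 x = x := by
  simp [pvShift]

theorem pv_shift_foldl {α : Type} (k : Int) (f : α → Int × Int) (l : List α) :
    ∀ b, pvShift k (l.foldl (fun a x => pvMax2 a (f x)) b)
      = l.foldl (fun a x => pvMax2 a (pvShift k (f x))) (pvShift k b) := by
  induction l with
  | nil => intro b; rfl
  | cons x l ih =>
    intro b
    simp only [List.foldl_cons]
    rw [ih, pv_shift_max2]

-- ---------- stabilization of the fueled recursions under Pre_ ----------

theorem pv_valF_terminal (E : List (Int × Int)) (n : Int) (h : pvPar E n = []) (k : Nat) :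
    pvValF E k n = (n, 0) := by
  cases k with
  | zero => rfl
  | succ k => simp [pvValF, h]

theorem pv_pcF_terminal (E : List (Int × Int)) (n : Int) (h : pvPar E n = []) (k : Nat) :
    pvPcF E k n = 1 := by
  cases k with
  | zero => rfl
  | succ k =>
    have h' : (pvGraphA E).getD n ([] : PySem.Set Int) = ([] : PySem.Set Int) := h
    simp [pvPcF, h']

theorem pv_valF_stab (E : List (Int × Int)) (s : Int)
    (hpre : Pre_class_earliest_ancestor E s) :
    ∀ h n, n ∈ pvReach E s → pvHgt E n ≤ h →
      ∀ k₁ k₂, h ≤ k₁ → h ≤ k₂ → pvValF E k₁ n = pvValF E k₂ n := by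
  intro h
  induction h with
  | zero =>
    intro n hn hh k₁ k₂ _ _
    rcases hp : pvPar E n with _ | ⟨q, qs⟩
    · rw [pv_valF_terminal E n hp, pv_valF_terminal E n hp]
    · exfalso
      have : pvHgt E q < pvHgt E n := pv_hgt_lt E hpre hn (by rw [hp]; exact List.mem_cons_self ..)
      omega
  | succ h ih =>
    intro n hn hh k₁ k₂ hk₁ hk₂
    rcases hp : pvPar E n with _ | ⟨q, qs⟩
    · rw [pv_valF_terminal E n hp, pv_valF_terminal E n hp]
    · obtain ⟨a, rfl⟩ : ∃ a, k₁ = a + 1 := ⟨k₁ - 1, by omega⟩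
      obtain ⟨b, rfl⟩ : ∃ b, k₂ = b + 1 := ⟨k₂ - 1, by omega⟩
      have hmem : ∀ p, p ∈ q :: qs → p ∈ pvPar E n := by intro p hmp; rw [hp]; exact hmp
      have hrec : ∀ p, p ∈ q :: qs → pvValF E a p = pvValF E b p := by
        intro p hmp
        have hplt : pvHgt E p < pvHgt E n := pv_hgt_lt E hpre hn (hmem p hmp)
        exact ih p (pv_reach_closed E hn (hmem p hmp)) (by omega) a b (by omega) (by omega)
      simp only [pvValF, hp]
      rw [hrec q (List.mem_cons_self ..)]
      apply PySem.List.foldl_congr_mem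
      intro acc x hx
      rw [hrec x (List.mem_cons_of_mem q hx)]

theorem pv_pcF_stab (E : List (Int × Int)) (s : Int)
    (hpre : Pre_class_earliest_ancestor E s) :
    ∀ h n, n ∈ pvReach E s → pvHgt E n ≤ h →
      ∀ k₁ k₂, h ≤ k₁ → h ≤ k₂ → pvPcF E k₁ n = pvPcF E k₂ n := by
  intro h
  induction h with
  | zero =>
    intro n hn hh k₁ k₂ _ _
    rcases hp : pvPar E n with _ | ⟨q, qs⟩
    · rw [pv_pcF_terminal E n hp, pv_pcF_terminal E n hp]
    · exfalso
      have : pvHgt E q < pvHgt E n := pv_hgt_lt E hpre hn (by rw [hp]; exact List.mem_cons_self ..)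
      omega
  | succ h ih =>
    intro n hn hh k₁ k₂ hk₁ hk₂
    rcases hp : pvPar E n with _ | ⟨q, qs⟩
    · rw [pv_pcF_terminal E n hp, pv_pcF_terminal E n hp]
    · obtain ⟨a, rfl⟩ : ∃ a, k₁ = a + 1 := ⟨k₁ - 1, by omega⟩
      obtain ⟨b, rfl⟩ : ∃ b, k₂ = b + 1 := ⟨k₂ - 1, by omega⟩
      have hmem : ∀ p, p ∈ q :: qs → p ∈ pvPar E n := by intro p hmp; rw [hp]; exact hmp
      have hrec : ∀ p, p ∈ q :: qs → pvPcF E a p = pvPcF E b p := by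
        intro p hmp
        have hplt : pvHgt E p < pvHgt E n := pv_hgt_lt E hpre hn (hmem p hmp)
        exact ih p (pv_reach_closed E hn (hmem p hmp)) (by omega) a b (by omega) (by omega)
      have h' : (pvGraphA E).getD n PySem.Set.empty = q :: qs := hp
      simp only [pvPcF, h']
      congr 1
      congr 1
      exact List.map_congr_left (fun x hx => hrec x hx)

-- stable identities

theorem pv_VAL_terminal (E : List (Int × Int)) (n : Int) (h : pvPar E n = []) :
    pvVAL E n = (n, 0) := pv_valF_terminal E n h _

theorem pv_VAL_step (E : List (Int × Int)) (s : Int)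
    (hpre : Pre_class_earliest_ancestor E s) {n : Int} (hn : n ∈ pvReach E s)
    {q : Int} {qs : List Int} (hp : pvPar E n = q :: qs) :
    pvVAL E n = qs.foldl (fun a p => pvMax2 a (pvShift 1 (pvVAL E p)))
      (pvShift 1 (pvVAL E q)) := by
  have hmem : ∀ p, p ∈ q :: qs → p ∈ pvPar E n := by intro p hmp; rw [hp]; exact hmp
  have hrec : ∀ p, p ∈ q :: qs → pvValF E E.length p = pvVAL E p := by
    intro p hmp
    have hplt : pvHgt E p < pvHgt E n := pv_hgt_lt E hpre hn (hmem p hmp)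
    have hle : pvHgt E n ≤ E.length := pv_hgt_le E n
    exact pv_valF_stab E s hpre (pvHgt E p) p (pv_reach_closed E hn (hmem p hmp)) (le_refl _)
      E.length (E.length + 1) (by omega) (by omega)
  show pvValF E (E.length + 1) n = _
  simp only [pvValF, hp]
  rw [hrec q (List.mem_cons_self ..)]
  apply PySem.List.foldl_congr_mem
  intro acc x hx
  rw [hrec x (List.mem_cons_of_mem q hx)]

theorem pv_PC_terminal (E : List (Int × Int)) (n : Int) (h : pvPar E n = []) :
    pvPC E n = 1 := pv_pcF_terminal E n h _

theorem pv_PC_step (E : List (Int × Int)) (s : Int)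
    (hpre : Pre_class_earliest_ancestor E s) {n : Int} (hn : n ∈ pvReach E s)
    {q : Int} {qs : List Int} (hp : pvPar E n = q :: qs) :
    pvPC E n = 1 + ((q :: qs).map (pvPC E)).sum := by
  have hmem : ∀ p, p ∈ q :: qs → p ∈ pvPar E n := by intro p hmp; rw [hp]; exact hmp
  have hrec : ∀ p, p ∈ q :: qs → pvPcF E E.length p = pvPC E p := by
    intro p hmp
    have hplt : pvHgt E p < pvHgt E n := pv_hgt_lt E hpre hn (hmem p hmp)
    have hle : pvHgt E n ≤ E.length := pv_hgt_le E n
    exact pv_pcF_stab E s hpre (pvHgt E p) p (pv_reach_closed E hn (hmem p hmp)) (le_refl _)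
      E.length (E.length + 1) (by omega) (by omega)
  have h' : (pvGraphA E).getD n PySem.Set.empty = q :: qs := hp
  show pvPcF E (E.length + 1) n = _
  simp only [pvPcF, h']
  congr 1
  congr 1
  exact List.map_congr_left (fun x hx => hrec x hx)

theorem pv_pcF_pos (E : List (Int × Int)) (k : Nat) (n : Int) : 1 ≤ pvPcF E k n := by
  cases k with
  | zero => exact le_refl _
  | succ k =>
    simp only [pvPcF]
    split
    · exact le_refl _
    · omega

theorem pv_valF_dist_nonneg (E : List (Int × Int)) :
    ∀ k n, 0 ≤ (pvValF E k n).2 := by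
  intro k
  induction k with
  | zero => intro n; simp [pvValF]
  | succ k ih =>
    intro n
    rcases hp : pvPar E n with _ | ⟨q, qs⟩
    · rw [pv_valF_terminal E n hp]
    · simp only [pvValF, hp]
      rcases pv_foldl_max2_mem (fun p => pvShift 1 (pvValF E k p)) qs (pvShift 1 (pvValF E k q))
        with h | ⟨x, _, h⟩
      · rw [h]; have := ih q; simp only [pvShift]; simp; omega
      · rw [h]; have := ih x; simp only [pvShift]; simp; omega

theorem pv_VAL_dist_pos (E : List (Int × Int)) (s : Int)
    (hpre : Pre_class_earliest_ancestor E s) {n : Int} (hn : n ∈ pvReach E s)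
    {q : Int} {qs : List Int} (hp : pvPar E n = q :: qs) : 1 ≤ (pvVAL E n).2 := by
  rw [pv_VAL_step E s hpre hn hp]
  rcases pv_foldl_max2_mem (fun p => pvShift 1 (pvVAL E p)) qs (pvShift 1 (pvVAL E q))
    with h | ⟨x, _, h⟩
  · rw [h]
    have h0 : 0 ≤ (pvVAL E q).2 := pv_valF_dist_nonneg E (E.length + 1) q
    simp only [pvShift]; simp; omega
  · rw [h]
    have h0 : 0 ≤ (pvVAL E x).2 := pv_valF_dist_nonneg E (E.length + 1) x
    simp only [pvShift]; simp; omega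

-- ---------- the A loop computes a max over the stack ----------

def pvSumPC (E : List (Int × Int)) (stack : List (Int × Int)) : Nat :=
  (stack.map (fun c => pvPC E c.1)).sum

theorem pv_prepend_foldl (d : Int) (ps : List Int) :
    ∀ rest : List (Int × Int),
      ps.foldl (fun st p => (p, d) :: st) rest = ps.reverse.map (fun p => (p, d)) ++ rest := by
  induction ps with
  | nil => intro rest; simp
  | cons q qs ih =>
    intro rest
    simp only [List.foldl_cons, List.reverse_cons, List.map_append]
    rw [ih]
    simp

theorem pv_loopA_eq (E : List (Int × Int)) (s : Int)
    (hpre : Pre_class_earliest_ancestor E s) :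
    ∀ fuel stack vis best, (∀ c ∈ stack, c.1 ∈ pvReach E s) → pvSumPC E stack ≤ fuel →
      pvLoopA (pvGraphA E) fuel stack vis best
        = stack.foldl (fun b c => pvMax2 b (pvShift c.2 (pvVAL E c.1))) best := by
  intro fuel
  induction fuel with
  | zero =>
    intro stack vis best hmem hsum
    rcases stack with _ | ⟨curr, rest⟩
    · rfl
    · exfalso
      have h1 : 1 ≤ pvPC E curr.1 := pv_pcF_pos E _ curr.1
      have : pvSumPC E (curr :: rest) = pvPC E curr.1 + pvSumPC E rest := by
        simp [pvSumPC]
      omega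
  | succ fuel ih =>
    intro stack vis best hmem hsum
    rcases stack with _ | ⟨curr, rest⟩
    · rfl
    · have hcur : curr.1 ∈ pvReach E s := hmem curr (List.mem_cons_self ..)
      have hsum' : pvSumPC E (curr :: rest) = pvPC E curr.1 + pvSumPC E rest := by
        simp [pvSumPC]
      rcases hp : pvPar E curr.1 with _ | ⟨q, qs⟩
      · -- terminal node: update best, continue with rest
        have hcont : (pvGraphA E).contains curr.1 = false := (pv_contains_graph E curr.1).2 hp
        have hone : pvPC E curr.1 = 1 := pv_PC_terminal E curr.1 hp
        have hbest : (if curr.2 > best.2 then curr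
            else if curr.2 = best.2 ∧ curr.1 < best.1 then curr else best)
            = pvMax2 best (pvShift curr.2 (pvVAL E curr.1)) := by
          rw [pv_VAL_terminal E curr.1 hp]
          simp only [pvMax2, pvShift]
          rcases best with ⟨bn, bd⟩; rcases curr with ⟨cn, cd⟩
          simp only []
          split_ifs <;> first | rfl | (exact Prod.ext (by omega) (by omega)) | omega
        simp only [pvLoopA, hcont, if_pos]
        rw [ih rest _ _ (fun c hc => hmem c (List.mem_cons_of_mem curr hc)) (by omega), hbest]
        simp
      · -- interior node: push all parents
        have hcont : (pvGraphA E).contains curr.1 = true := by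
          rcases hcb : (pvGraphA E).contains curr.1 with _ | _
          · exact absurd ((pv_contains_graph E curr.1).1 hcb) (by simp [hp])
          · rfl
        have hGD : (pvGraphA E).getD curr.1 PySem.Set.empty = q :: qs := hp
        have hPCeq : pvPC E curr.1 = 1 + ((q :: qs).map (pvPC E)).sum :=
          pv_PC_step E s hpre hcur hp
        -- the new stack
        have hstack : ((pvGraphA E).getD curr.1 PySem.Set.empty).foldl
            (fun st p => (p, curr.2 + 1) :: st) rest
            = (q :: qs).reverse.map (fun p => (p, curr.2 + 1)) ++ rest := by
          rw [hGD, pv_prepend_foldl]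
        have hmem' : ∀ c ∈ (q :: qs).reverse.map (fun p => (p, curr.2 + 1)) ++ rest,
            c.1 ∈ pvReach E s := by
          intro c hc
          rcases List.mem_append.1 hc with hc | hc
          · rcases List.mem_map.1 hc with ⟨p, hpm, rfl⟩
            exact pv_reach_closed E hcur (by rw [hp]; exact (List.mem_reverse).1 hpm)
          · exact hmem c (List.mem_cons_of_mem curr hc)
        have hsum'' : pvSumPC E ((q :: qs).reverse.map (fun p => (p, curr.2 + 1)) ++ rest)
            ≤ fuel := by
          have : pvSumPC E ((q :: qs).reverse.map (fun p => (p, curr.2 + 1)) ++ rest)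
              = ((q :: qs).map (pvPC E)).sum + pvSumPC E rest := by
            simp only [pvSumPC, List.map_append, List.sum_append, List.map_map]
            congr 1
            rw [show ((fun c => pvPC E c.1) ∘ fun p => (p, curr.2 + 1)) = pvPC E from rfl]
            rw [List.map_reverse, List.sum_reverse]
          omega
        have hred : pvLoopA (pvGraphA E) (fuel + 1) (curr :: rest) vis best
            = pvLoopA (pvGraphA E) fuel
              ((q :: qs).reverse.map (fun p => (p, curr.2 + 1)) ++ rest)
              (vis.add curr) best := by
          simp only [pvLoopA, hcont]
          rw [← hstack]
          simp
        rw [hred, ih _ _ _ hmem' hsum'']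
        -- now both sides are folds; combine the pushed parents into one pvMax2 step
        rw [List.foldl_append, List.foldl_cons]
        congr 1
        rw [List.foldl_map]
        rw [pv_foldl_max2_perm (fun p => pvShift (curr.2 + 1) (pvVAL E p)) best
          (List.reverse_perm (q :: qs))]
        rw [pv_foldl_max2_cons]
        congr 1
        rw [pv_VAL_step E s hpre hcur hp, pv_shift_foldl]
        rw [pv_shift_shift]
        rw [show (1 : Int) + curr.2 = curr.2 + 1 from by omega]
        apply PySem.List.foldl_congr_mem
        intro acc x _
        rw [pv_shift_shift, show (1 : Int) + curr.2 = curr.2 + 1 from by omega]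

-- ---------- the B memoized recursion computes pvVAL (transposed) ----------

def pvT (x : Int × Int) : Int × Int := (x.2, -x.1)

def pvBval (E : List (Int × Int)) (n : Int) : Int × Int := pvT (pvVAL E n)

def pvPyMax (a b : Int × Int) : Int × Int :=
  if a.1 < b.1 ∨ (a.1 = b.1 ∧ a.2 < b.2) then b else a

def pvInv (E : List (Int × Int)) (memo : PySem.Dict Int (Int × Int)) : Prop :=
  ∀ k v, memo.get? k = some v → v = pvBval E k

theorem pv_T_max2 (x y : Int × Int) : pvT (pvMax2 x y) = pvPyMax (pvT x) (pvT y) := by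
  rcases x with ⟨a, b⟩; rcases y with ⟨c, d⟩
  simp only [pvMax2, pvT, pvPyMax]
  split_ifs <;> first | rfl | (exact Prod.ext (by omega) (by omega)) | omega

theorem pv_T_foldl {α : Type} (f : α → Int × Int) (l : List α) :
    ∀ b, pvT (l.foldl (fun a p => pvMax2 a (f p)) b)
      = l.foldl (fun a p => pvPyMax a (pvT (f p))) (pvT b) := by
  induction l with
  | nil => intro b; rfl
  | cons x l ih =>
    intro b
    simp only [List.foldl_cons]
    rw [ih, pv_T_max2]

theorem pv_T_shift1 (E : List (Int × Int)) (p : Int) :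
    pvT (pvShift 1 (pvVAL E p)) = ((pvVAL E p).2 + 1, -(pvVAL E p).1) := by
  simp [pvT, pvShift]

theorem pv_inv_insert (E : List (Int × Int)) {memo : PySem.Dict Int (Int × Int)}
    (hinv : pvInv E memo) (n : Int) : pvInv E (memo.insert n (pvBval E n)) := by
  intro k v h
  rw [PySem.Dict.get?_insert] at h
  split_ifs at h with hk
  · cases h; rw [hk]
  · exact hinv k v h

theorem pv_bestB_eq (E : List (Int × Int)) (s : Int)
    (hpre : Pre_class_earliest_ancestor E s) :
    ∀ fuel n memo, n ∈ pvReach E s → pvHgt E n < fuel → pvInv E memo →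
      (pvBestB (pvGraphA E) fuel memo n).1 = pvBval E n ∧
        pvInv E (pvBestB (pvGraphA E) fuel memo n).2 := by
  intro fuel
  induction fuel with
  | zero => intro n memo _ hf _; omega
  | succ fuel ih =>
    intro n memo hn hf hinv
    rcases hm : memo.get? n with _ | r
    · rcases hg : (pvGraphA E).get? n with _ | ps
      · -- terminal
        have hp : pvPar E n = [] := pv_get?_graph_none E n hg
        have hval : pvBval E n = (0, -n) := by
          rw [pvBval, pv_VAL_terminal E n hp]; rfl
        simp only [pvBestB, hm, hg]
        constructor
        · exact hval.symm
        · rw [← hval]; exact pv_inv_insert E hinv n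
      · -- interior
        have hps : ps = pvPar E n := pv_get?_graph_some E n ps hg
        have hcont : ¬ pvPar E n = [] := by
          intro hnil
          have : (pvGraphA E).contains n = false := (pv_contains_graph E n).2 hnil
          rw [PySem.Dict.contains_eq_isSome_get?, hg] at this
          simp at this
        rcases hp : pvPar E n with _ | ⟨q, qs⟩
        · exact absurd hp hcont
        · -- the inner fold over the parents
          have hmemp : ∀ p ∈ q :: qs, p ∈ pvReach E s ∧ pvHgt E p < fuel := by
            intro p hpm
            have hpp : p ∈ pvPar E n := by rw [hp]; exact hpm
            refine ⟨pv_reach_closed E hn hpp, ?_⟩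
            have := pv_hgt_lt E hpre hn hpp
            omega
          have hfold : ∀ (l : List Int), (∀ p ∈ l, p ∈ pvReach E s ∧ pvHgt E p < fuel) →
              ∀ (acc : List (Int × Int)) (m : PySem.Dict Int (Int × Int)), pvInv E m →
              (l.foldl (fun (stm : List (Int × Int) × PySem.Dict Int (Int × Int)) p =>
                  let res := pvBestB (pvGraphA E) fuel stm.2 p
                  (stm.1 ++ [(res.1.1 + 1, res.1.2)], res.2)) (acc, m)).1
                = acc ++ l.map (fun p => ((pvVAL E p).2 + 1, -(pvVAL E p).1)) ∧
              pvInv E ((l.foldl (fun (stm : List (Int × Int) × PySem.Dict Int (Int × Int)) p =>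
                  let res := pvBestB (pvGraphA E) fuel stm.2 p
                  (stm.1 ++ [(res.1.1 + 1, res.1.2)], res.2)) (acc, m)).2) := by
            intro l
            induction l with
            | nil => intro _ acc m hm'; exact ⟨by simp, hm'⟩
            | cons p l ihl =>
              intro hl acc m hm'
              have hph := hl p (List.mem_cons_self ..)
              have hcall := ih p m hph.1 hph.2 hm'
              simp only [List.foldl_cons]
              have hres1 : (pvBestB (pvGraphA E) fuel m p).1 = pvBval E p := hcall.1
              have hrest := ihl (fun x hx => hl x (List.mem_cons_of_mem p hx))
                (acc ++ [((pvBestB (pvGraphA E) fuel m p).1.1 + 1,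
                  (pvBestB (pvGraphA E) fuel m p).1.2)]) (pvBestB (pvGraphA E) fuel m p).2 hcall.2
              constructor
              · rw [hrest.1, hres1]
                simp [pvBval, pvT]
              · exact hrest.2
          have hF := hfold (q :: qs) hmemp [] memo hinv
          -- reduce the port one step
          simp only [pvBestB, hm, hg, hps, hp]
          rcases hL : ((q :: qs).foldl (fun (stm : List (Int × Int) × PySem.Dict Int (Int × Int)) p =>
              let res := pvBestB (pvGraphA E) fuel stm.2 p
              (stm.1 ++ [(res.1.1 + 1, res.1.2)], res.2))
              (([] : List (Int × Int)), memo)) with ⟨vals, memo₁⟩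
          rw [hL] at hF
          simp only [] at hF
          have hinv₁ : pvInv E memo₁ := hF.2
          have hvals : vals = (q :: qs).map (fun p => ((pvVAL E p).2 + 1, -(pvVAL E p).1)) := by
            have := hF.1; simpa using this
          subst hvals
          simp only [List.map_cons]
          have hr : ((qs.map (fun p => ((pvVAL E p).2 + 1, -(pvVAL E p).1))).foldl
              (fun a b => if a.1 < b.1 ∨ (a.1 = b.1 ∧ a.2 < b.2) then b else a)
              ((pvVAL E q).2 + 1, -(pvVAL E q).1)) = pvBval E n := by
            show (qs.map (fun p => ((pvVAL E p).2 + 1, -(pvVAL E p).1))).foldl pvPyMax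
                ((pvVAL E q).2 + 1, -(pvVAL E q).1) = pvBval E n
            rw [pvBval, pv_VAL_step E s hpre hn hp, pv_T_foldl]
            rw [pv_T_shift1]
            rw [List.foldl_map]
            apply PySem.List.foldl_congr_mem
            intro acc x _
            rw [pv_T_shift1]
          constructor
          · simpa using hr
          · have hins : pvInv E (memo₁.insert n (pvBval E n)) := pv_inv_insert E hinv₁ n
            simpa [hr] using hins
    · -- memo hit
      simp only [pvBestB, hm]
      exact ⟨hinv n r hm, hinv⟩

-- ---------- putting both sides together ----------

theorem pv_max2_start (E : List (Int × Int)) (s : Int)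
    (hpre : Pre_class_earliest_ancestor E s) :
    pvMax2 (s, (0 : Int)) (pvVAL E s) = pvVAL E s := by
  rcases hp : pvPar E s with _ | ⟨q, qs⟩
  · rw [pv_VAL_terminal E s hp]
    exact pv_max2_self _
  · apply pv_max2_right
    have h1 := pv_VAL_dist_pos E s hpre (pv_mem_reach_self E s) hp
    show (0 : Int) < (pvVAL E s).2
    omega

theorem pv_A_value (E : List (Int × Int)) (s : Int)
    (hpre : Pre_class_earliest_ancestor E s) :
    class_earliest_ancestor E s = (if (pvVAL E s).1 ≠ s then (pvVAL E s).1 else -1) := by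
  have hmem : ∀ c ∈ [((s : Int), (0 : Int))], c.1 ∈ pvReach E s := by
    intro c hc
    simp only [List.mem_singleton] at hc
    subst hc
    exact pv_mem_reach_self E s
  have hsum : pvSumPC E [((s : Int), (0 : Int))] ≤ pvPcF E (E.length + 1) s := by
    simp [pvSumPC, pvPC]
  have hloop := pv_loopA_eq E s hpre (pvPcF E (E.length + 1) s)
    [((s : Int), (0 : Int))] PySem.Set.empty ((s : Int), (0 : Int)) hmem hsum
  show (if (pvLoopA (pvGraphA E) (pvPcF E (E.length + 1) s)
      [((s : Int), (0 : Int))] PySem.Set.empty ((s : Int), (0 : Int))).1 ≠ s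
    then (pvLoopA (pvGraphA E) (pvPcF E (E.length + 1) s)
      [((s : Int), (0 : Int))] PySem.Set.empty ((s : Int), (0 : Int))).1 else -1) = _
  rw [hloop]
  simp only [List.foldl_cons, List.foldl_nil]
  rw [show pvShift ((s : Int), (0 : Int)).2 (pvVAL E ((s : Int), (0 : Int)).1)
      = pvVAL E s from by rw [show ((s : Int), (0 : Int)).2 = (0 : Int) from rfl]; exact pv_shift_zero _]
  rw [pv_max2_start E s hpre]

theorem pv_B_value (E : List (Int × Int)) (s : Int)
    (hpre : Pre_class_earliest_ancestor E s) :
    class_earliest_ancestor_alt E s = (if (pvVAL E s).1 ≠ s then (pvVAL E s).1 else -1) := by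
  have hinv0 : pvInv E PySem.Dict.empty := by
    intro k v h
    rw [PySem.Dict.get?_empty] at h
    cases h
  have hb := (pv_bestB_eq E s hpre (E.length + 2) s PySem.Dict.empty
    (pv_mem_reach_self E s) (by have := pv_hgt_le E s; omega) hinv0).1
  show (if -(pvBestB (pvGraphA E) (E.length + 2) PySem.Dict.empty s).1.2 ≠ s
    then -(pvBestB (pvGraphA E) (E.length + 2) PySem.Dict.empty s).1.2 else -1) = _
  rw [hb]
  simp [pvBval, pvT]

-- ===== VERDICT (by name: the statement is the Claim_ definition above) =====
theorem class_earliest_ancestor_spec : Claim_equal_class_earliest_ancestor := by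
  intro ancestors starting_node hdom hpre
  show class_earliest_ancestor ancestors starting_node
    = class_earliest_ancestor_alt ancestors starting_node
  rw [pv_A_value ancestors starting_node hpre, pv_B_value ancestors starting_node hpre]
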